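-- pv_equiv track=rewrite | github.com/TheShepherd-ne/my-intervention | 1_1_Prime_Divisior.py | result
-- ===== SOURCE A (Python) =====
-- def result (x, r) :
--
--     maxim = 0
--     bigger = 0
--
--     for i in range( 0, len( r ) ) :
--         if r[ i ] >= maxim :
--             maxim = r[ i ]
--             if x[ i ] >= bigger :
--                 bigger = x[ i ]
--
--     return f"{bigger} {maxim}"
-- ===== SOURCE B (Python) =====
-- def result(x, r):
--     # thresholds[i] = max(0, r[:i]): the running threshold before step i
--     thresholds = [0]
--     for v in r:
--         t = thresholds[-1]
--         thresholds.append(v if v > t else t)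
--     # the x-values at the positions whose r-value reaches its threshold
--     qualified = [xi for ri, xi, t in zip(r, x, thresholds) if ri >= t]
--     bigger = max([0] + qualified)
--     return f"{bigger} {thresholds[-1]}"
-- ===== Notes on version B (the rewrite author's own statement) =====
-- stated objective: alternative
-- what changed: A's coupled stateful loop is replaced by building an explicit prefix-maximum threshold table, selecting the qualifying x-values by a filtering comprehension over zip(r, x, thresholds), and taking max([0]+qualified); the answer pair is never threaded through one loop.
import Mathlib
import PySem

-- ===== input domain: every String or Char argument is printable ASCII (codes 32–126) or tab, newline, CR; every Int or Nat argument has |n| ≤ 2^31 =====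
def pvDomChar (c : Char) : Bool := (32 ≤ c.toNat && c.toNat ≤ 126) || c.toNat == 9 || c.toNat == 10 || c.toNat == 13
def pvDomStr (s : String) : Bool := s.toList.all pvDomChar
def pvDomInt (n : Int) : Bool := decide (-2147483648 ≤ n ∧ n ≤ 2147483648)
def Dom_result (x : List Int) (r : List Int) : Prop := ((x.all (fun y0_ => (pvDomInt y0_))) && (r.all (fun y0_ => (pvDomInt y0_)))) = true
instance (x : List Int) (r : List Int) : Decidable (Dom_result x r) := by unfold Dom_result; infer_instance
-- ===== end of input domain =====

-- B replaces A's coupled stateful loop by an explicit prefix-maximum threshold table,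
-- a filtering pass over zip(r, x, thresholds) and a plain max (objective: alternative).

-- ===== PORT A =====
-- A's loop body: update (maxim, bigger) at index i
def stepA (x r : List Int) (mb : Int × Int) (i : Int) : Int × Int :=
  if PySem.List.pyGetD r i 0 ≥ mb.1 then
    (PySem.List.pyGetD r i 0,
     if PySem.List.pyGetD x i 0 ≥ mb.2 then PySem.List.pyGetD x i 0 else mb.2)
  else mb

def result (x : List Int) (r : List Int) : String :=
  let s := (PySem.List.pyRange 0 (r.length : Int) 1).foldl (stepA x r) ((0 : Int), (0 : Int))
  PySem.Int.toStr s.2 ++ " " ++ PySem.Int.toStr s.1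

-- ===== PORT B =====
def result_alt (x : List Int) (r : List Int) : String :=
  -- thresholds[i] = max(0, r[:i]); thresholds[-1] ported as getLastD 0 (the list is never empty)
  let thresholds := r.foldl (fun ts v =>
      let t := ts.getLastD 0
      ts ++ [if v > t then v else t]) [0]
  let qualified := ((r.zip (x.zip thresholds)).filter
      (fun p => decide (p.2.2 ≤ p.1))).map (fun p => p.2.1)
  -- max([0] + qualified) ported as the max-fold over qualified started at 0 (exact)
  let bigger := qualified.foldl max 0
  PySem.Int.toStr bigger ++ " " ++ PySem.Int.toStr (thresholds.getLastD 0)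

-- ===== PRECONDITION & SPEC =====
-- Pre_ excludes exactly the inputs on which Python A raises IndexError: some index i ≥ len(x)
-- whose r[i] reaches the running maximum max(0, r[:i]) (B silently skips such i, A raises).
def Pre_result (x : List Int) (r : List Int) : Prop :=
  ∀ i : Nat, i < r.length → x.length ≤ i → r.getD i 0 < (r.take i).foldl max 0
instance (x : List Int) (r : List Int) : Decidable (Pre_result x r) := by
  unfold Pre_result; infer_instance

def pvWitness_result : List Int × List Int := ([3, 1, 4], [2, 2, 1])

def Spec_result (x : List Int) (r : List Int) (out : String) : Prop := out = result_alt x r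
instance (x : List Int) (r : List Int) (out : String) : Decidable (Spec_result x r out) := by unfold Spec_result; infer_instance

-- ===== CLAIM (what is proved, stated in full; the proofs are below) =====
def Claim_equal_result : Prop := ∀ (x : List Int) (r : List Int), Dom_result x r → Pre_result x r → Spec_result x r (result x r)

-- ===== LEMMAS AND PROOFS =====

-- the prefix-max scan underlying B's threshold table
def scanMax (c : Int) : List Int → List Int
  | [] => []
  | v :: t => (if v > c then v else c) :: scanMax (if v > c then v else c) t

-- the x-values B selects, expressed with a running threshold
def qual (m : Int) : List (Int × Int) → List Int
  | [] => []
  | (ri, xi) :: t => if ri ≥ m then xi :: qual ri t else qual m t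

theorem if_gt_eq_max (c v : Int) : (if v > c then v else c) = max c v := by
  rcases le_or_gt v c with h | h <;> simp [max_def] <;> omega

-- B's threshold fold is the scan
theorem thresholds_eq_scan (r : List Int) :
    ∀ (acc : List Int) (c : Int), acc.getLastD 0 = c →
      r.foldl (fun ts v =>
          let t := ts.getLastD 0
          ts ++ [if v > t then v else t]) acc = acc ++ scanMax c r := by
  induction r with
  | nil => intro acc c _; simp [scanMax]
  | cons v t ih =>
    intro acc c h
    simp only [List.foldl_cons, h, scanMax]
    rw [ih (acc ++ [if v > c then v else c]) (if v > c then v else c) (by simp)]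
    simp

-- last entry of the threshold table = fold of max
theorem last_scanMax (r : List Int) :
    ∀ (c d : Int), (c :: scanMax c r).getLastD d = r.foldl max c := by
  induction r with
  | nil => intro c d; simp [scanMax]
  | cons v t ih =>
    intro c d
    simp only [scanMax, List.foldl_cons, if_gt_eq_max]
    rw [List.getLastD_cons]
    exact ih (max c v) c

-- B's filtered comprehension over zip(r, x, thresholds) = the running-threshold selection
theorem zip_filter_eq_qual (r : List Int) :
    ∀ (x : List Int) (c : Int),
      ((r.zip (x.zip (c :: scanMax c r))).filter
          (fun p => decide (p.2.2 ≤ p.1))).map (fun p => p.2.1) = qual c (r.zip x) := by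
  induction r with
  | nil => intro x c; simp [qual]
  | cons ri rt ih =>
    intro x c
    cases x with
    | nil => simp [qual]
    | cons xi xt =>
      simp only [scanMax, List.zip_cons_cons, List.filter_cons, qual]
      by_cases h : ri ≥ c
      · have hv : (if ri > c then ri else c) = ri := by omega
        rw [if_pos h]
        simp only [hv, decide_eq_true_eq, h, if_pos]
        simp only [List.map_cons]
        rw [ih xt ri]
      · have hv : (if ri > c then ri else c) = c := by omega
        rw [if_neg h]
        simp only [hv]
        have : ¬ (c ≤ ri) := h
        simp only [decide_eq_false this, if_neg (by simp : ¬ (false = true))]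
        rw [ih xt c]

-- the key invariant: A's indexed fold, from index k, computed from the drops
theorem foldA_key (x r : List Int) (hPre : Pre_result x r) :
    ∀ (d k : Nat) (m b : Int), k + d = r.length →
      m = (r.take k).foldl max 0 →
      (PySem.List.pyRange (k : Int) (r.length : Int) 1).foldl (stepA x r) (m, b)
        = ((r.drop k).foldl max m,
           (qual m ((r.drop k).zip (x.drop k))).foldl max b) := by
  intro d
  induction d with
  | zero =>
    intro k m b hk _
    have hk' : k = r.length := by omega
    subst hk'
    rw [PySem.List.pyRange_one_eq_nil (by omega)]
    simp [qual]
  | succ d ih =>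
    intro k m b hk hm
    have hklt : k < r.length := by omega
    rw [PySem.List.pyRange_one_cons (by exact_mod_cast hklt)]
    simp only [List.foldl_cons]
    have hstep : stepA x r (m, b) (k : Int)
        = if r[k] ≥ m then (r[k], if PySem.List.pyGetD x (k : Int) 0 ≥ b
              then PySem.List.pyGetD x (k : Int) 0 else b) else (m, b) := by
      simp [stepA, PySem.List.pyGetD_natCast, List.getD_eq_getElem?_getD, hklt]
    have htake : (r.take (k + 1)).foldl max 0 = max m r[k] := by
      rw [← List.take_concat_get' r k hklt, List.foldl_append, hm]; simp
    have hdropr : r.drop k = r[k] :: r.drop (k + 1) :=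
      List.drop_eq_getElem_cons hklt
    have hcast : ((k : Int) + 1) = ((k + 1 : Nat) : Int) := by push_cast; ring
    by_cases hge : r[k] ≥ m
    · -- record index: x[k] must exist, else Pre_ is violated
      have hxlt : k < x.length := by
        by_contra hxk
        have := hPre k hklt (by omega)
        rw [List.getD_eq_getElem?_getD, List.getElem?_eq_getElem hklt] at this
        simp at this; omega
      have hdropx : x.drop k = x[k] :: x.drop (k + 1) :=
        List.drop_eq_getElem_cons hxlt
      have hxk : PySem.List.pyGetD x (k : Int) 0 = x[k] := by
        simp [PySem.List.pyGetD_natCast, List.getD_eq_getElem?_getD, hxlt]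
      rw [hstep, if_pos hge, hxk, hcast,
        ih (k + 1) r[k] (if x[k] ≥ b then x[k] else b) (by omega)
          (by rw [htake]; omega)]
      rw [hdropr, hdropx, List.zip_cons_cons]
      simp only [qual, if_pos hge, List.foldl_cons]
      have h1 : max m r[k] = r[k] := by omega
      have h2 : (if x[k] ≥ b then x[k] else b) = max b x[k] := by
        rw [max_def]
      rw [h1, h2]
    · -- non-record index: state unchanged
      rw [hstep, if_neg hge, hcast,
        ih (k + 1) m b (by omega) (by rw [htake]; omega)]
      have h1 : max m r[k] = m := by omega
      rw [hdropr]
      simp only [List.foldl_cons, h1]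
      congr 1
      cases hx : x.drop k with
      | nil =>
        have : x.drop (k + 1) = [] := by
          have := congrArg List.length hx
          simp at this
          rw [List.drop_eq_nil_iff]; omega
        rw [this]; simp
      | cons xk xt =>
        have hxlt : k < x.length := by
          by_contra hxk
          rw [List.drop_eq_nil_iff.mpr (by omega)] at hx
          simp at hx
        rw [List.drop_eq_getElem_cons hxlt] at hx
        rw [← hx, List.zip_cons_cons]
        simp [qual, hge]

-- ===== VERDICT (by name: the statement is the Claim_ definition above) =====
theorem result_spec : Claim_equal_result := by
  intro x r _ hPre
  unfold Spec_result
  have hK := foldA_key x r hPre r.length 0 0 0 (by omega) (by simp)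
  simp only [Nat.cast_zero, List.drop_zero] at hK
  have hT := thresholds_eq_scan r [0] 0 (by simp)
  simp only [List.singleton_append] at hT
  have hQ := zip_filter_eq_qual r x 0
  have hL := last_scanMax r 0 0
  simp only [result, result_alt, hK, hT, hQ, hL]
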